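-- pv_equiv track=rewrite | github.com/Haksell/codeforces | 1520E.py | f
-- ===== SOURCE A (Python) =====
-- def f(s):
--     res = dots = 0
--     for c in s:
--         if c == ".":
--             dots += 1
--         else:
--             res += dots
--     return res
-- ===== SOURCE B (Python) =====
-- def f(s):
--     idx = [i for i, c in enumerate(s) if c != "."]
--     k = len(idx)
--     return sum(idx) - k * (k - 1) // 2
-- ===== Notes on version B (the rewrite author's own statement) =====
-- stated objective: alternative
-- what changed: B replaces A's single-pass accumulation of a running dot counter by a closed form: it collects the positions of the non-dot characters and returns sum(positions) - k*(k-1)//2, since the dots before a non-dot at position i number i minus the non-dots before it.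
import Mathlib
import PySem

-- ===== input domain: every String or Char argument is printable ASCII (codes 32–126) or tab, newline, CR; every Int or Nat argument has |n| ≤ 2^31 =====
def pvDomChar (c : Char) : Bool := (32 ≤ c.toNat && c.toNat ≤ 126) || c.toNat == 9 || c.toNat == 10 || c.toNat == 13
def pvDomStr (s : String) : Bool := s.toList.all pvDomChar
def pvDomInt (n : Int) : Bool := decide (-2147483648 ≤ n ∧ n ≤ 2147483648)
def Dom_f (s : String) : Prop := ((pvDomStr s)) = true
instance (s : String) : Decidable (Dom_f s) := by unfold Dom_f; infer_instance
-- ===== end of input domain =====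

-- B replaces A's running-counter pass by a closed form over the positions of the
-- non-dot characters: sum(positions) - k*(k-1)//2; same O(n), different algorithm.

-- ===== PORT A =====
-- res = dots = 0; for c in s: if c == ".": dots += 1 else: res += dots; return res
def f (s : String) : Int :=
  (s.toList.foldl
    (fun (st : Int × Int) c => if c = '.' then (st.1, st.2 + 1) else (st.1 + st.2, st.2))
    (0, 0)).1

-- ===== PORT B =====
-- idx = [i for i, c in enumerate(s) if c != "."]; k = len(idx); return sum(idx) - k*(k-1)//2
def f_alt (s : String) : Int :=
  let idx : List Int :=
    (PySem.List.enumerate s.toList 0).filterMap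
      (fun (p : Int × Char) => if p.2 ≠ '.' then some p.1 else none)
  let k : Int := idx.length
  idx.sum - PySem.Int.floordiv (k * (k - 1)) 2

-- ===== PRECONDITION & SPEC =====
def Spec_f (s : String) (out : Int) : Prop := out = f_alt s
instance (s : String) (out : Int) : Decidable (Spec_f s out) := by unfold Spec_f; infer_instance

-- ===== CLAIM (what is proved, stated in full; the proofs are below) =====
def Claim_equal_f : Prop := ∀ (s : String), Dom_f s → Spec_f s (f s)

-- ===== LEMMAS AND PROOFS =====

-- number of non-dots / dots in a list
def cntN : List Char → Int
  | [] => 0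
  | c :: t => (if c = '.' then 0 else 1) + cntN t

def cntD : List Char → Int
  | [] => 0
  | c :: t => (if c = '.' then 1 else 0) + cntD t

-- A's answer: Σ over non-dots of dots strictly before them
def Sa : List Char → Int
  | [] => 0
  | c :: t => if c = '.' then Sa t + cntN t else Sa t

-- Σ of the positions of the non-dots, positions starting at i
def Sidx : List Char → Int → Int
  | [], _ => 0
  | c :: t, i => (if c = '.' then 0 else i) + Sidx t (i + 1)

theorem foldA_eq (l : List Char) (r d : Int) :
    l.foldl (fun (st : Int × Int) c => if c = '.' then (st.1, st.2 + 1) else (st.1 + st.2, st.2)) (r, d)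
      = (r + Sa l + d * cntN l, d + cntD l) := by
  induction l generalizing r d with
  | nil => simp [Sa, cntN, cntD]
  | cons c t ih =>
    by_cases h : c = '.' <;> simp [Sa, cntN, cntD, h, ih, Prod.mk.injEq] <;> (try constructor) <;> ring

theorem cntN_nonneg (l : List Char) : 0 ≤ cntN l := by
  induction l with
  | nil => simp [cntN]
  | cons c t ih => by_cases h : c = '.' <;> simp [cntN, h] <;> omega

-- the central identity: 2·Sa l + n(n−1) + 2·i·n = 2·Sidx l i where n = cntN l
theorem two_Sa_eq (l : List Char) (i : Int) :
    2 * Sa l + cntN l * (cntN l - 1) + 2 * i * cntN l = 2 * Sidx l i := by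
  induction l generalizing i with
  | nil => simp [Sa, cntN, Sidx]
  | cons c t ih =>
    by_cases h : c = '.' <;> simp [Sa, cntN, Sidx, h] <;>
      [skip; skip] <;> (have := ih (i + 1); nlinarith [this])

theorem filterMap_sum_eq (l : List Char) (i : Int) :
    ((PySem.List.enumerate l i).filterMap
      (fun (p : Int × Char) => if p.2 ≠ '.' then some p.1 else none)).sum = Sidx l i := by
  induction l generalizing i with
  | nil => simp [PySem.List.enumerate_nil, Sidx]
  | cons c t ih =>
    have ih' := ih (i + 1)
    simp only [show (fun (p : Int × Char) => if p.2 ≠ '.' then some p.1 else none)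
        = (fun (p : Int × Char) => if p.2 = '.' then none else some p.1) from by
      funext p; by_cases h : p.2 = '.' <;> simp [h]] at ih' ⊢
    by_cases h : c = '.' <;> simp [PySem.List.enumerate_cons, h, Sidx, ih']

theorem filterMap_len_eq (l : List Char) (i : Int) :
    (((PySem.List.enumerate l i).filterMap
      (fun (p : Int × Char) => if p.2 ≠ '.' then some p.1 else none)).length : Int) = cntN l := by
  induction l generalizing i with
  | nil => simp [PySem.List.enumerate_nil, cntN]
  | cons c t ih =>
    have ih' := ih (i + 1)
    simp only [show (fun (p : Int × Char) => if p.2 ≠ '.' then some p.1 else none)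
        = (fun (p : Int × Char) => if p.2 = '.' then none else some p.1) from by
      funext p; by_cases h : p.2 = '.' <;> simp [h]] at ih' ⊢
    by_cases h : c = '.' <;> simp [PySem.List.enumerate_cons, h, cntN, ih'] <;> omega

-- ===== VERDICT (by name: the statement is the Claim_ definition above) =====
theorem f_spec : Claim_equal_f := by
  intro s _
  unfold Spec_f f f_alt
  rw [foldA_eq]
  simp only [filterMap_sum_eq, filterMap_len_eq]
  have hkey := two_Sa_eq s.toList 0
  have hn := cntN_nonneg s.toList
  have hfd : PySem.Int.floordiv (cntN s.toList * (cntN s.toList - 1)) 2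
      = cntN s.toList * (cntN s.toList - 1) / 2 :=
    PySem.Int.floordiv_eq_ediv_of_pos (by omega)
  rw [hfd]
  omega
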